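-- pv_equiv track=rewrite | github.com/sudiptap/algods | ds_algo/patterns/dynamic_programming/13_digit_dp/solutions/3621-number-of-integers-with-popcount-depth-equal-to-k-i.py | countIntegers
-- ===== SOURCE A (Python) =====
-- def countIntegers(n: int, k: int) -> int:
--     if n <= 0:
--         return 0
--
--     def popcount_depth(x):
--         """Compute depth: repeatedly take popcount until 1."""
--         if x <= 0:
--             return -1  # undefined
--         depth = 0
--         while x > 1:
--             x = bin(x).count('1')
--             depth += 1
--         return depth
--
--     # Digit DP on binary representation of n
--     bits = bin(n)[2:]
--     L = len(bits)
--     from functools import lru_cache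
--
--     @lru_cache(maxsize=None)
--     def dp(pos, popcount, tight, started):
--         """Count numbers with popcount-depth == k."""
--         if pos == L:
--             if not started:
--                 return 0
--             # popcount is the popcount of the number.
--             # If popcount == 1, the number is a power of 2.
--             # If the number is 1, depth = 0. Otherwise depth = 1 + depth(popcount).
--             # But we don't know if the number is 1 vs another power of 2.
--             # We DO know: number is 1 iff popcount==1 and the number uses 1 bit total,
--             # i.e., the number representation is just "1" in binary.
--             # We can track this separately, but simpler: the number has L bits
--             # (possibly with leading zeros absorbed). If popcount==1, depth=0 only
--             # if number==1. Number==1 means all bits are 0 except the last.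
--             # Since we're counting with started flag, popcount=1 and started=True
--             # means the number has exactly one 1-bit. It's 1 only if L-position=0
--             # at that point, but we lose that info. Use a workaround:
--             # just compute depth as 1 + popcount_depth(popcount) for popcount > 1,
--             # and depth=1 for popcount==1 (covers powers of 2 >= 2).
--             # Number 1 will have depth=1 here, but actual depth(1)=0.
--             # We'll subtract 1 at the end if k==0 (for number 1) or add 1 if k==1.
--             if popcount <= 1:
--                 depth = popcount  # 0 if popcount=0 (shouldn't happen with started), 1 if popcount=1
--             else:
--                 depth = 1 + popcount_depth(popcount)
--             return 1 if depth == k else 0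
--
--         limit = int(bits[pos]) if tight else 1
--         result = 0
--         for d in range(0, limit + 1):
--             new_tight = tight and (d == limit)
--             new_started = started or (d == 1)
--             new_pop = (popcount + d) if started else (d if d == 1 else 0)
--             result += dp(pos + 1, new_pop, new_tight, new_started)
--
--         return result
--
--     count = dp(0, 0, True, False)
--     # Fix: number 1 has depth 0 but we counted it as depth 1.
--     # Adjust: if k==0 and n>=1, add 1 (number 1). If k==1 and n>=1, subtract 1.
--     if n >= 1:
--         if k == 0:
--             count += 1
--         elif k == 1:
--             count -= 1
--     return count
-- ===== SOURCE B (Python) =====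
-- from math import comb
--
--
-- def countIntegers(n: int, k: int) -> int:
--     if n <= 0:
--         return 0
--     if k == 0:
--         return 1  # only x = 1 has popcount-depth 0
--     bits = bin(n)[2:]
--     L = len(bits)
--     total = 0
--     for p in range(1, L + 1):
--         if _depth(p) != k - 1:
--             continue
--         # count integers in [1, n] with exactly p set bits (binomial bit-walk)
--         ones = 0
--         for i, b in enumerate(bits):
--             if b == '1':
--                 need = p - ones
--                 rem = L - 1 - i
--                 if 0 <= need <= rem:
--                     total += comb(rem, need)
--                 ones += 1
--         if ones == p:
--             total += 1  # n itself
--     if k == 1: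
--         total -= 1  # x = 1 was counted under p == 1 but its depth is 0
--     return total
--
--
-- def _depth(x):
--     d = 0
--     while x > 1:
--         x = bin(x).count('1')
--         d += 1
--     return d
-- ===== Notes on version B (the rewrite author's own statement) =====
-- stated objective: simpler
-- what changed: Replaced the recursive binary digit DP (dp over position/popcount/tight/started with lru_cache, plus post-hoc k==0/k==1 fixups) by a direct combinatorial count: for each popcount value p in 1..bit_length(n) whose depth is k-1, count integers in [1,n] with exactly p set bits via the standard binomial bit-walk; k==0 answered in closed form and x=1 adjusted for k==1.
import Mathlib
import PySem

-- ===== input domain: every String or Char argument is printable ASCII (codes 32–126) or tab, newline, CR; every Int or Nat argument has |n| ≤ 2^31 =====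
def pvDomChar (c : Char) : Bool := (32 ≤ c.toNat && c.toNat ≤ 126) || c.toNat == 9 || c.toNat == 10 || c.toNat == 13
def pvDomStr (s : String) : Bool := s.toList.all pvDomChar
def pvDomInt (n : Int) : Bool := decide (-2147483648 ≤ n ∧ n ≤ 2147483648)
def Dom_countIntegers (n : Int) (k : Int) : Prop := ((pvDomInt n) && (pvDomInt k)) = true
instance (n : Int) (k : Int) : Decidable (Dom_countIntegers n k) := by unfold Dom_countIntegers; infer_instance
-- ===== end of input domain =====

-- B replaces A's binary digit DP by a per-popcount binomial bit-walk (simpler, no DP state); return values proved equal.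

-- ===== PORT A =====
-- shared helper: both Pythons contain the identical loop `while x > 1: x = bin(x).count('1'); d += 1`
-- (A inside popcount_depth, B inside _depth); fuel x.toNat always suffices since bin(x).count('1') < x for x ≥ 2.
def depthLoop : Nat → Int → Int → Int
  | 0, _, d => d
  | f + 1, x, d =>
    if 1 < x then depthLoop f (((PySem.Int.toBinChars x).count '1' : Nat) : Int) (d + 1) else d

-- A's popcount_depth
def popcountDepthA (x : Int) : Int := if x ≤ 0 then -1 else depthLoop x.toNat x 0

-- A's dp(pos, popcount, tight, started), recursing on the remaining suffix of `bits`.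
-- int(bits[pos]) is ported via PySem.Int.ofChars?; the chars of bin(n)[2:] are '0'/'1' so it never fails (getD 0 unreachable).
def dpA (k : Int) : List Char → Int → Bool → Bool → Int
  | [], popcount, _tight, started =>
    if started = false then 0
    else
      let depth := if popcount ≤ 1 then popcount else 1 + popcountDepthA popcount
      if depth = k then 1 else 0
  | b :: rest, popcount, tight, started =>
    let limit : Int := if tight then (PySem.Int.ofChars? [b]).getD 0 else 1
    (PySem.List.pyRange 0 (limit + 1) 1).foldl
      (fun result d =>
        result + dpA k rest (if started then popcount + d else if d = 1 then d else 0)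
            (tight && decide (d = limit)) (started || decide (d = 1))) 0

def countIntegers (n : Int) (k : Int) : Int :=
  if n ≤ 0 then 0
  else
    let bits := PySem.Int.toBinChars n    -- bin(n)[2:]
    let count := dpA k bits 0 true false
    if 1 ≤ n then
      if k = 0 then count + 1
      else if k = 1 then count - 1
      else count
    else count

-- ===== PORT B =====
-- B's _depth (same while-loop, no guard)
def depthB (x : Int) : Int := depthLoop x.toNat x 0

def countIntegers_alt (n : Int) (k : Int) : Int :=
  if n ≤ 0 then 0
  else if k = 0 then 1
  else
    let bits := PySem.Int.toBinChars n    -- bin(n)[2:]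
    let L : Int := bits.length
    let total := (PySem.List.pyRange 1 (L + 1) 1).foldl
      (fun total p =>
        if depthB p ≠ k - 1 then total
        else
          let s := (PySem.List.enumerate bits).foldl
            (fun (tc : Int × Int) ib =>
              if ib.2 = '1' then
                let need := p - tc.2
                let rem := L - 1 - ib.1
                ((if 0 ≤ need ∧ need ≤ rem then tc.1 + ((rem.toNat.choose need.toNat : Nat) : Int)
                  else tc.1), tc.2 + 1)
              else tc) (total, 0)
          if s.2 = p then s.1 + 1 else s.1) 0
    if k = 1 then total - 1 else total

-- ===== PRECONDITION & SPEC =====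
def Spec_countIntegers (n : Int) (k : Int) (out : Int) : Prop := out = countIntegers_alt n k
instance (n : Int) (k : Int) (out : Int) : Decidable (Spec_countIntegers n k out) := by unfold Spec_countIntegers; infer_instance

-- ===== CLAIM (what is proved, stated in full; the proofs are below) =====
def Claim_equal_countIntegers : Prop := ∀ (n : Int) (k : Int), Dom_countIntegers n k → Spec_countIntegers n k (countIntegers n k)

-- ===== LEMMAS AND PROOFS =====

-- 0/1 indicator of "popcount value q is selected" (depth q = k - 1)
def pvInd (k : Int) (q : Nat) : Int := if depthLoop q (q : Int) 0 = k - 1 then 1 else 0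

-- number of untight completions: ∑_j C(m,j) · [sel (c+j)]
def pvU (k : Int) (m c : Nat) : Int :=
  ∑ j ∈ Finset.range (m + 1), ((m.choose j : Nat) : Int) * pvInd k (c + j)

-- loop part of B's binomial walk over a suffix, `c` ones already seen
def pvWalkW : List Char → Nat → Nat → Int
  | [], _, _ => 0
  | b :: r, c, p =>
    if b = '1' then
      (if c ≤ p ∧ p - c ≤ r.length then ((r.length.choose (p - c) : Nat) : Int) else 0)
        + pvWalkW r (c + 1) p
    else pvWalkW r c p

-- full walk: loop part plus the final `ones == p` check
def pvWalk (s : List Char) (c p : Nat) : Int :=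
  pvWalkW s c p + (if c + s.count '1' = p then 1 else 0)

-- B's grand total in closed sum form
def pvTotB (k : Int) (bits : List Char) : Int :=
  ∑ j ∈ Finset.range bits.length, pvInd k (j + 1) * pvWalk bits 0 (j + 1)

def pvBin (bs : List Char) : Prop := ∀ b ∈ bs, b = '0' ∨ b = '1'

lemma depthLoop_nonneg : ∀ (f : Nat) (x d : Int), d ≤ depthLoop f x d := by
  intro f
  induction f with
  | zero => intro x d; simp [depthLoop]
  | succ f ih =>
    intro x d
    simp only [depthLoop]
    split
    · exact le_trans (by omega) (ih _ (d+1))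
    · exact le_refl d

lemma dpA_untight_started (k : Int) (b : Char) (r : List Char) (pc : Int) :
    dpA k (b :: r) pc false true = dpA k r pc false true + dpA k r (pc + 1) false true := by
  simp [dpA, show PySem.List.pyRange 0 2 1 = [0,1] from by decide]

lemma dpA_untight_notstarted (k : Int) (b : Char) (r : List Char) :
    dpA k (b :: r) 0 false false = dpA k r 0 false false + dpA k r 1 false true := by
  simp [dpA, show PySem.List.pyRange 0 2 1 = [0,1] from by decide]

lemma dpA_tight_one (k : Int) (r : List Char) (pc : Int) :
    dpA k ('1' :: r) pc true true = dpA k r pc false true + dpA k r (pc + 1) true true := by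
  simp [dpA, show PySem.List.pyRange 0 2 1 = [0,1] from by decide,
        show (PySem.Int.ofChars? ['1']).getD 0 = 1 from by decide]

lemma dpA_tight_zero (k : Int) (r : List Char) (pc : Int) :
    dpA k ('0' :: r) pc true true = dpA k r pc true true := by
  simp [dpA, show PySem.List.pyRange 0 1 1 = [0] from by decide,
        show (PySem.Int.ofChars? ['0']).getD 0 = 0 from by decide]

lemma dpA_top (k : Int) (r : List Char) :
    dpA k ('1' :: r) 0 true false = dpA k r 0 false false + dpA k r 1 true true := by
  simp [dpA, show PySem.List.pyRange 0 2 1 = [0,1] from by decide,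
        show (PySem.Int.ofChars? ['1']).getD 0 = 1 from by decide]

lemma dpA_leaf (k : Int) (c : Nat) (hc : 1 ≤ c) (t : Bool) :
    dpA k [] (c : Int) t true = pvInd k c := by
  rcases Nat.lt_or_ge c 2 with h | h
  · interval_cases c
    simp only [dpA, pvInd, Nat.cast_one, show depthLoop 1 (1:Int) 0 = 0 from by decide]
    norm_num
    split_ifs <;> omega
  · have h1 : ¬ ((c : Int) ≤ 1) := by omega
    have h0 : ¬ ((c : Int) ≤ 0) := by omega
    simp only [dpA, pvInd, popcountDepthA, if_neg h1, if_neg h0, Int.toNat_natCast]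
    norm_num
    split_ifs <;> omega

lemma pvU_pascal (k : Int) (m c : Nat) :
    pvU k (m + 1) c = pvU k m c + pvU k m (c + 1) := by
  have e1 : pvU k (m+1) c
      = ((m+1).choose 0 : Int) * pvInd k c
        + ∑ j ∈ Finset.range (m + 1), (((m+1).choose (j+1) : Nat) : Int) * pvInd k (c + (j+1)) := by
    rw [pvU, Finset.sum_range_succ']
    simp only [Nat.add_zero]
    ring
  have e2 : pvU k m c
      = (m.choose 0 : Int) * pvInd k c
        + ∑ j ∈ Finset.range m, ((m.choose (j+1) : Nat) : Int) * pvInd k (c + (j+1)) := by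
    rw [pvU, Finset.sum_range_succ']
    simp only [Nat.add_zero]
    ring
  have e3 : ∑ j ∈ Finset.range (m + 1), (((m+1).choose (j+1) : Nat) : Int) * pvInd k (c + (j+1))
      = ∑ j ∈ Finset.range (m + 1), ((m.choose j : Nat) : Int) * pvInd k (c + (j+1))
        + ∑ j ∈ Finset.range (m + 1), ((m.choose (j+1) : Nat) : Int) * pvInd k (c + (j+1)) := by
    rw [← Finset.sum_add_distrib]
    refine Finset.sum_congr rfl ?_
    intro j _
    rw [Nat.choose_succ_succ]
    push_cast
    ring
  have e4 : ∑ j ∈ Finset.range (m + 1), ((m.choose j : Nat) : Int) * pvInd k (c + (j+1))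
      = pvU k m (c+1) := by
    rw [pvU]; refine Finset.sum_congr rfl ?_; intro j _; ring_nf
  have e5 : ∑ j ∈ Finset.range (m + 1), ((m.choose (j+1) : Nat) : Int) * pvInd k (c + (j+1))
      = ∑ j ∈ Finset.range m, ((m.choose (j+1) : Nat) : Int) * pvInd k (c + (j+1)) := by
    rw [Finset.sum_range_succ, Nat.choose_succ_self]
    simp
  rw [e1, e3, e4, e5, e2]
  simp [Nat.choose_zero_right]
  ring

lemma dpA_untight_eq_pvU (k : Int) : ∀ (r : List Char) (c : Nat), 1 ≤ c →
    dpA k r (c : Int) false true = pvU k r.length c := by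
  intro r
  induction r with
  | nil =>
    intro c hc
    rw [dpA_leaf k c hc]
    simp [pvU]
  | cons b r ih =>
    intro c hc
    rw [dpA_untight_started, ih c hc, show ((c:Int)+1) = ((c+1 : Nat) : Int) by push_cast; ring,
      ih (c+1) (by omega)]
    simp [List.length_cons, pvU_pascal]

lemma dpA_notstarted_eq (k : Int) : ∀ (r : List Char),
    dpA k r 0 false false = ∑ i ∈ Finset.range r.length, pvU k i 1 := by
  intro r
  induction r with
  | nil => simp [dpA]
  | cons b r ih =>
    rw [dpA_untight_notstarted, ih, show (1:Int) = ((1:Nat) : Int) by norm_num,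
      dpA_untight_eq_pvU k r 1 le_rfl]
    simp [List.length_cons, Finset.sum_range_succ]

lemma pvWalk_cons_one (r : List Char) (c p : Nat) :
    pvWalk ('1' :: r) c p
      = (if c ≤ p ∧ p - c ≤ r.length then ((r.length.choose (p - c) : Nat) : Int) else 0)
        + pvWalk r (c + 1) p := by
  simp only [pvWalk, pvWalkW, List.count_cons]
  have : c + (r.count '1' + 1) = c + 1 + r.count '1' := by omega
  simp [this]
  ring

lemma pvWalk_cons_ne (b : Char) (hb : b ≠ '1') (r : List Char) (c p : Nat) :
    pvWalk (b :: r) c p = pvWalk r c p := by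
  simp [pvWalk, pvWalkW, hb]

lemma pvWalk_zero : ∀ (r : List Char) (c p : Nat), p < c → pvWalk r c p = 0 := by
  intro r
  induction r with
  | nil => intro c p h; simp [pvWalk, pvWalkW]; omega
  | cons b r ih =>
    intro c p h
    by_cases hb : b = '1'
    · subst hb
      rw [pvWalk_cons_one, if_neg (by omega), ih (c+1) p (by omega)]
      simp
    · rw [pvWalk_cons_ne b hb, ih c p h]

lemma pvReindex (k : Int) (S m c : Nat) (h : c + m ≤ S) :
    (∑ p ∈ Finset.range (S + 1),
        pvInd k p * (if c ≤ p ∧ p - c ≤ m then ((m.choose (p - c) : Nat) : Int) else 0))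
      = pvU k m c := by
  have hsub : Finset.Icc c (c + m) ⊆ Finset.range (S + 1) := by
    intro p hp
    simp only [Finset.mem_Icc] at hp
    simp only [Finset.mem_range]
    omega
  rw [← Finset.sum_subset hsub]
  · rw [show Finset.Icc c (c + m) = Finset.Ico c (c + m + 1) by
        ext x; simp only [Finset.mem_Icc, Finset.mem_Ico]; omega,
      Finset.sum_Ico_eq_sum_range]
    simp only [Nat.add_sub_cancel_left, show c + m + 1 - c = m + 1 by omega]
    rw [pvU]
    refine Finset.sum_congr rfl ?_
    intro j hj
    simp only [Finset.mem_range] at hj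
    rw [if_pos (by omega)]
    try simp only [Nat.add_sub_cancel_left]
    ring
  · intro p hp hnp
    simp only [Finset.mem_Icc] at hnp
    rw [if_neg (by omega)]
    ring

lemma dpA_tight_eq (k : Int) : ∀ (r : List Char) (c S : Nat), pvBin r → 1 ≤ c →
    c + r.length ≤ S →
    dpA k r (c : Int) true true = ∑ p ∈ Finset.range (S + 1), pvInd k p * pvWalk r c p := by
  intro r
  induction r with
  | nil =>
    intro c S _ hc hS
    rw [dpA_leaf k c hc]
    have : ∀ p ∈ Finset.range (S+1), pvInd k p * pvWalk [] c p
        = if p = c then pvInd k c else 0 := by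
      intro p hp
      by_cases hpc : p = c
      · subst hpc; simp [pvWalk, pvWalkW]
      · simp [pvWalk, pvWalkW, hpc, show ¬ (c = p) from fun h => hpc h.symm]
    rw [Finset.sum_congr rfl this, Finset.sum_ite_eq' (Finset.range (S+1)) c (fun _ => pvInd k c),
      if_pos (by simp only [Finset.mem_range]; omega)]
  | cons b r ih =>
    intro c S hbin hc hS
    have hbinr : pvBin r := fun x hx => hbin x (List.mem_cons_of_mem b hx)
    rcases hbin b (List.mem_cons_self) with hb | hb
    · subst hb
      rw [dpA_tight_zero, ih c S hbinr hc (by simp at hS ⊢; omega)]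
      refine Finset.sum_congr rfl ?_
      intro p _
      rw [pvWalk_cons_ne '0' (by decide) r c p]
    · subst hb
      rw [dpA_tight_one, dpA_untight_eq_pvU k r c hc,
        show ((c:Int)+1) = ((c+1 : Nat) : Int) by push_cast; ring,
        ih (c+1) S hbinr (by omega) (by simp at hS ⊢; omega)]
      have : ∀ p ∈ Finset.range (S+1), pvInd k p * pvWalk ('1'::r) c p
          = pvInd k p * (if c ≤ p ∧ p - c ≤ r.length then ((r.length.choose (p - c) : Nat) : Int) else 0)
            + pvInd k p * pvWalk r (c+1) p := by
        intro p _
        rw [pvWalk_cons_one]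
        ring
      rw [Finset.sum_congr rfl this, Finset.sum_add_distrib,
        pvReindex k S r.length c (by simp at hS; omega)]

lemma pvV (k : Int) : ∀ (m : Nat),
    (∑ i ∈ Finset.range m, pvU k i 1)
      = ∑ j ∈ Finset.range m, ((m.choose (j + 1) : Nat) : Int) * pvInd k (j + 1) := by
  intro m
  induction m with
  | zero => simp
  | succ m ih =>
    rw [Finset.sum_range_succ, ih]
    have e1 : ∑ j ∈ Finset.range (m+1), (((m+1).choose (j + 1) : Nat) : Int) * pvInd k (j + 1)
        = ∑ j ∈ Finset.range (m+1), (((m.choose j : Nat) : Int) * pvInd k (j+1)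
            + ((m.choose (j+1) : Nat) : Int) * pvInd k (j + 1)) := by
      refine Finset.sum_congr rfl ?_
      intro j _
      rw [Nat.choose_succ_succ]
      push_cast
      ring
    rw [e1, Finset.sum_add_distrib]
    have e2 : ∑ j ∈ Finset.range (m+1), ((m.choose j : Nat) : Int) * pvInd k (j+1) = pvU k m 1 := by
      rw [pvU]
      refine Finset.sum_congr rfl ?_
      intro j _
      rw [Nat.add_comm 1 j]
    have e3 : ∑ j ∈ Finset.range (m+1), ((m.choose (j+1) : Nat) : Int) * pvInd k (j + 1)
        = ∑ j ∈ Finset.range m, ((m.choose (j+1) : Nat) : Int) * pvInd k (j + 1) := by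
      rw [Finset.sum_range_succ, Nat.choose_succ_self]
      simp
    rw [e2, e3]
    ring

lemma dpA_main (k : Int) (rest : List Char) (hb : pvBin rest) :
    dpA k ('1' :: rest) 0 true false = pvTotB k ('1' :: rest) := by
  rw [dpA_top, dpA_notstarted_eq,
    show (1:Int) = ((1 : Nat) : Int) by norm_num,
    dpA_tight_eq k rest 1 (rest.length + 1) hb le_rfl (by omega)]
  rw [pvTotB]
  have expand : ∀ j ∈ Finset.range ('1'::rest).length,
      pvInd k (j+1) * pvWalk ('1'::rest) 0 (j+1)
        = pvInd k (j+1) * (if j + 1 ≤ rest.length then ((rest.length.choose (j+1) : Nat) : Int) else 0)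
          + pvInd k (j+1) * pvWalk rest 1 (j+1) := by
    intro j _
    rw [pvWalk_cons_one]
    simp only [Nat.zero_le, true_and, Nat.zero_add, Nat.sub_zero]
    ring
  rw [Finset.sum_congr rfl expand, Finset.sum_add_distrib]
  have eA1 : ∑ i ∈ Finset.range rest.length, pvU k i 1
      = ∑ j ∈ Finset.range ('1'::rest).length,
          pvInd k (j+1) * (if j + 1 ≤ rest.length then ((rest.length.choose (j+1) : Nat) : Int) else 0) := by
    rw [pvV k rest.length]
    simp only [List.length_cons]
    rw [Finset.sum_range_succ, if_neg (by omega)]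
    have : ∀ j ∈ Finset.range rest.length,
        ((rest.length.choose (j+1) : Nat) : Int) * pvInd k (j+1)
          = pvInd k (j+1) * (if j + 1 ≤ rest.length then ((rest.length.choose (j+1) : Nat) : Int) else 0) := by
      intro j hj
      simp only [Finset.mem_range] at hj
      rw [if_pos (by omega)]
      ring
    rw [Finset.sum_congr rfl this]
    ring
  have eA2 : ∑ p ∈ Finset.range (rest.length + 1 + 1), pvInd k p * pvWalk rest 1 p
      = ∑ j ∈ Finset.range ('1'::rest).length, pvInd k (j+1) * pvWalk rest 1 (j+1) := by
    rw [Finset.sum_range_succ']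
    simp only [List.length_cons]
    rw [pvWalk_zero rest 1 0 (by omega)]
    ring_nf
  rw [eA1, eA2]

lemma toDigitsCore_structure : ∀ (f m : Nat) (l : List Char), 1 ≤ m → m ≤ f →
    ∃ d, Nat.toDigitsCore 2 f m l = d ++ l ∧ d ≠ [] ∧ d.head? = some '1' ∧ pvBin d := by
  intro f
  induction f with
  | zero => intro m l h1 h2; omega
  | succ f ih =>
    intro m l h1 _
    rcases Nat.lt_or_ge m 2 with h | h
    · interval_cases m
      refine ⟨['1'], ?_, by simp, rfl, by intro b hb; simp at hb; right; exact hb⟩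
      simp [Nat.toDigitsCore]
      decide
    · have hm2 : ¬ (m / 2 = 0) := by omega
      obtain ⟨d, hd, hne, hh, hbin⟩ := ih (m / 2) ((m % 2).digitChar :: l) (by omega) (by omega)
      refine ⟨d ++ [(m % 2).digitChar], ?_, by simp [hne], ?_, ?_⟩
      · simp only [Nat.toDigitsCore, if_neg hm2]
        rw [hd]
        simp
      · rw [List.head?_append_of_ne_nil _ hne]
        exact hh
      · intro b hb
        rcases List.mem_append.mp hb with hb | hb
        · exact hbin b hb
        · simp at hb
          subst hb
          have : m % 2 = 0 ∨ m % 2 = 1 := by omega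
          rcases this with h0 | h0 <;> rw [h0] <;> simp [Nat.digitChar]

lemma toDigits_binary (m : Nat) (hm : 1 ≤ m) :
    ∃ r, Nat.toDigits 2 m = '1' :: r ∧ pvBin r := by
  obtain ⟨d, hd, hne, hh, hbin⟩ := toDigitsCore_structure (m + 1) m [] hm (by omega)
  rcases d with _ | ⟨c, d'⟩
  · simp at hne
  · simp at hh
    subst hh
    refine ⟨d', ?_, fun b hb => hbin b (by simp [hb])⟩
    rw [Nat.toDigits, hd]
    simp

lemma inner_fold (LL : Int) (pN : Nat) :
    ∀ (s : List Char) (a t : Int) (c : Nat), a + (s.length : Int) = LL →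
    (PySem.List.enumerate s a).foldl
      (fun (tc : Int × Int) ib =>
        if ib.2 = '1' then
          ((if 0 ≤ (pN : Int) - tc.2 ∧ (pN : Int) - tc.2 ≤ LL - 1 - ib.1
            then tc.1 + (((LL - 1 - ib.1).toNat.choose ((pN : Int) - tc.2).toNat : Nat) : Int)
            else tc.1), tc.2 + 1)
        else tc) (t, (c : Int))
      = (t + pvWalkW s c pN, (c : Int) + (s.count '1' : Int)) := by
  intro s
  induction s with
  | nil =>
    intro a t c h
    rw [show PySem.List.enumerate ([] : List Char) a = [] from by simp [pysem]]
    simp [pvWalkW]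
  | cons b s ih =>
    intro a t c h
    rw [show PySem.List.enumerate (b :: s) a = (a, b) :: PySem.List.enumerate s (a + 1) from by
      simp [pysem]]
    simp only [List.foldl_cons, List.length_cons] at h ⊢
    by_cases hb : b = '1'
    · subst hb
      have hrem : LL - 1 - a = (s.length : Int) := by push_cast at h; omega
      have hstep : (if 0 ≤ (pN : Int) - (c : Int) ∧ (pN : Int) - (c : Int) ≤ LL - 1 - a
            then t + (((LL - 1 - a).toNat.choose ((pN : Int) - (c : Int)).toNat : Nat) : Int)
            else t)
          = t + (if c ≤ pN ∧ pN - c ≤ s.length then ((s.length.choose (pN - c) : Nat) : Int) else 0) := by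
        by_cases hg : c ≤ pN ∧ pN - c ≤ s.length
        · rw [if_pos (by rw [hrem]; constructor <;> omega), if_pos hg, hrem]
          have h1 : ((s.length : Int)).toNat = s.length := Int.toNat_natCast _
          have h2 : ((pN : Int) - (c : Int)).toNat = pN - c := by omega
          rw [h1, h2]
        · rw [if_neg (by rw [hrem]; intro hcon; exact hg (by constructor <;> omega)), if_neg hg]
          ring
      simp only [if_true]
      rw [hstep, show ((c : Int) + 1) = ((c + 1 : Nat) : Int) from by push_cast; ring,
        ih (a + 1) _ (c + 1) (by push_cast at h ⊢; omega)]
      simp only [pvWalkW, if_true, List.count_cons_self, Prod.mk.injEq]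
      refine ⟨by ring, by push_cast; ring⟩
    · simp only [if_neg hb]
      rw [ih (a + 1) t c (by push_cast at h ⊢; omega)]
      simp only [pvWalkW, if_neg hb]
      rw [List.count_cons_of_ne (by exact fun hcon => hb hcon)]


lemma pvTotB_k0 (bits : List Char) : pvTotB 0 bits = 0 := by
  rw [pvTotB]
  refine Finset.sum_eq_zero ?_
  intro j _
  have := depthLoop_nonneg (j+1) ((j+1 : Nat) : Int) 0
  rw [pvInd, if_neg (by omega)]
  ring

lemma alt_total_eq (k : Int) (bits : List Char) :
    (PySem.List.pyRange 1 ((bits.length : Int) + 1) 1).foldl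
      (fun total p =>
        if depthB p ≠ k - 1 then total
        else
          let s := (PySem.List.enumerate bits).foldl
            (fun (tc : Int × Int) ib =>
              if ib.2 = '1' then
                let need := p - tc.2
                let rem := (bits.length : Int) - 1 - ib.1
                ((if 0 ≤ need ∧ need ≤ rem then tc.1 + ((rem.toNat.choose need.toNat : Nat) : Int)
                  else tc.1), tc.2 + 1)
              else tc) (total, 0)
          if s.2 = p then s.1 + 1 else s.1) 0 = pvTotB k bits := by
  have hbody : ∀ (t p : Int), 1 ≤ p →
      (if depthB p ≠ k - 1 then t
       else
         let s := (PySem.List.enumerate bits).foldl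
           (fun (tc : Int × Int) ib =>
             if ib.2 = '1' then
               let need := p - tc.2
               let rem := (bits.length : Int) - 1 - ib.1
               ((if 0 ≤ need ∧ need ≤ rem then tc.1 + ((rem.toNat.choose need.toNat : Nat) : Int)
                 else tc.1), tc.2 + 1)
             else tc) (t, 0)
         if s.2 = p then s.1 + 1 else s.1)
      = t + pvInd k p.toNat * pvWalk bits 0 p.toNat := by
    intro t p hp
    have hcast : ((p.toNat : Nat) : Int) = p := Int.toNat_of_nonneg (by omega)
    by_cases hd : depthB p = k - 1
    · rw [if_neg (by simpa using hd)]
      have hin := inner_fold (bits.length : Int) p.toNat bits 0 t 0 (by ring)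
      rw [show ((0 : Nat) : Int) = (0 : Int) from rfl] at hin
      simp only [hcast] at hin
      simp only []
      rw [hin]
      have hind : pvInd k p.toNat = 1 := by
        rw [pvInd, if_pos]
        rw [hcast]
        simpa [depthB, hcast] using hd
      rw [hind, pvWalk]
      by_cases hq : bits.count '1' = p.toNat
      · rw [if_pos (by push_cast; omega), if_pos (by omega)]
        ring
      · rw [if_neg (by push_cast; omega), if_neg (by omega)]
        ring
    · rw [if_pos (by simpa using hd)]
      have hind : pvInd k p.toNat = 0 := by
        rw [pvInd, if_neg]
        rw [hcast]
        simpa [depthB, hcast] using hd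
      rw [hind]
      ring
  rw [PySem.List.pyRange_one]
  have hlen : (((bits.length : Int) + 1 - 1)).toNat = bits.length := by omega
  rw [hlen, List.foldl_map]
  have hext : List.foldl
        (fun (t : Int) (j : Nat) =>
          (fun total p =>
            if depthB p ≠ k - 1 then total
            else
              let s := (PySem.List.enumerate bits).foldl
                (fun (tc : Int × Int) ib =>
                  if ib.2 = '1' then
                    let need := p - tc.2
                    let rem := (bits.length : Int) - 1 - ib.1
                    ((if 0 ≤ need ∧ need ≤ rem then tc.1 + ((rem.toNat.choose need.toNat : Nat) : Int)
                      else tc.1), tc.2 + 1)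
                  else tc) (total, 0)
              if s.2 = p then s.1 + 1 else s.1) t (1 + (j : Int))) 0 (List.range bits.length)
      = List.foldl (fun (t : Int) (j : Nat) => t + pvInd k (j+1) * pvWalk bits 0 (j+1)) 0
          (List.range bits.length) := by
    refine List.foldl_ext _ _ _ ?_
    intro t j _
    beta_reduce
    rw [hbody t (1 + (j : Int)) (by omega),
      show (1 + (j : Int)).toNat = j + 1 from by omega]
  rw [hext, PySem.List.foldl_add (List.range bits.length)
    (fun j => pvInd k (j+1) * pvWalk bits 0 (j+1)) 0]
  rw [pvTotB]
  simp only [zero_add]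
  rfl

-- ===== VERDICT (by name: the statement is the Claim_ definition above) =====
theorem countIntegers_spec : Claim_equal_countIntegers := by
  intro n k _
  unfold Spec_countIntegers
  by_cases hn : n ≤ 0
  · simp [countIntegers, countIntegers_alt, if_pos hn]
  · have hn1 : 1 ≤ n := by omega
    have hnneg : ¬ n < 0 := by omega
    obtain ⟨r, hr, hrb⟩ := toDigits_binary n.toNat (by omega)
    have hbits : PySem.Int.toBinChars n = '1' :: r := by
      simp only [PySem.Int.toBinChars, if_neg hnneg]
      exact hr
    have hmain : dpA k (PySem.Int.toBinChars n) 0 true false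
        = pvTotB k (PySem.Int.toBinChars n) := by
      rw [hbits]
      exact dpA_main k r hrb
    have hA : countIntegers n k
        = (if k = 0 then pvTotB k (PySem.Int.toBinChars n) + 1
           else if k = 1 then pvTotB k (PySem.Int.toBinChars n) - 1
           else pvTotB k (PySem.Int.toBinChars n)) := by
      simp only [countIntegers, if_neg hn, if_pos hn1, hmain]
    have hB : countIntegers_alt n k
        = (if k = 0 then 1
           else if k = 1 then pvTotB k (PySem.Int.toBinChars n) - 1
           else pvTotB k (PySem.Int.toBinChars n)) := by
      by_cases hk : k = 0
      · simp only [countIntegers_alt, if_neg hn, if_pos hk]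
      · simp only [countIntegers_alt, if_neg hn, if_neg hk]
        rw [alt_total_eq k (PySem.Int.toBinChars n)]
    rw [hA, hB]
    by_cases hk : k = 0
    · subst hk
      rw [if_pos rfl, if_pos rfl, pvTotB_k0]
      ring
    · rw [if_neg hk, if_neg hk]
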